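-- pv_equiv track=rewrite | github.com/deep6821/rohit-workspace | programs/must-do-ques/recursion/special_keyboard.py | find_optimal3
-- ===== SOURCE A (Python) =====
-- def find_optimal3(num):
--     if num <= 6:
--         return num
--
--     screen = [0] * num
--     for i in range(1, 7):
--         screen[i-1] = i
--
--     for i in range(7, num+1):
--         # for any keystroke n, we will need to choose between:-
--         # 1. pressing Ctrl-V once after copying the
--         # A's obtained by n-3 keystrokes.
--
--         # 2. pressing Ctrl-V twice after copying the A's
--         # obtained by n-4 keystrokes.
--
--         # 3. pressing Ctrl-V thrice after copying the A's
--         # obtained by n-5 keystrokes.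
--         screen[i - 1] = max(2 * screen[i - 4], max(3 * screen[i - 5], 4 * screen[i - 6]))
--
--     return screen[num-1]
-- ===== SOURCE B (Python) =====
-- def find_optimal3(num):
--     # Closed form: the DP stabilizes into a multiply-by-4-every-5-keystrokes
--     # regime from num = 11 on; pow() does the rest in O(log num) multiplies.
--     if num <= 6:
--         return num
--     if num <= 10:
--         return (9, 12, 16, 20)[num - 7]
--     k, r = divmod(num - 11, 5)
--     return (27, 36, 48, 64, 81)[r] * 4 ** k
-- ===== Notes on version B (the rewrite author's own statement) =====
-- stated objective: faster
-- what changed: Replaced the linear DP array with the closed form of its stabilized periodic regime: a small base table entry times a power of four computed by fast exponentiation.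
import Mathlib
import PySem

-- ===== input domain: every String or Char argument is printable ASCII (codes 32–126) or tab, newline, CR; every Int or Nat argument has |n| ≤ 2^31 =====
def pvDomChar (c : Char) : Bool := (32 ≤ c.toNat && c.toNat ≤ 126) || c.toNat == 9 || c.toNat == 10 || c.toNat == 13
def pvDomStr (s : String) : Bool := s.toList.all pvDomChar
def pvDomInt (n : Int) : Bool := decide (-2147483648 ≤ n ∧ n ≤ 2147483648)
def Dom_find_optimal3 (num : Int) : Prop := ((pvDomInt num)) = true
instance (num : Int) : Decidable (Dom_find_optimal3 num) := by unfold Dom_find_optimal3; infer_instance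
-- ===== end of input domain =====

-- B replaces A's linear DP array with the closed form of its stabilized periodic regime
-- (a base-table entry times a power of four): objective 'faster'.

-- ===== PORT A =====
-- loop body of A's main DP loop (screen[i-1] = max(2*screen[i-4], max(3*screen[i-5], 4*screen[i-6])));
-- all indices are in range in A, so the total pyGetD/pySetD forms are exact here
def pvStep (s : List Int) (i : Int) : List Int :=
  PySem.List.pySetD s (i - 1)
    (max (2 * PySem.List.pyGetD s (i - 4) 0)
      (max (3 * PySem.List.pyGetD s (i - 5) 0) (4 * PySem.List.pyGetD s (i - 6) 0)))

def find_optimal3 (num : Int) : Int :=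
  if num ≤ 6 then num
  else
    let screen := List.replicate num.toNat 0   -- [0] * num (num ≥ 7 in this branch)
    let screen := (PySem.List.pyRange 1 7 1).foldl (fun s i => PySem.List.pySetD s (i - 1) i) screen
    let screen := (PySem.List.pyRange 7 (num + 1) 1).foldl pvStep screen
    PySem.List.pyGetD screen (num - 1) 0

-- ===== PORT B =====
def find_optimal3_alt (num : Int) : Int :=
  if num ≤ 6 then num
  else if num ≤ 10 then PySem.List.pyGetD [9, 12, 16, 20] (num - 7) 0
  else
    let k := PySem.Int.floordiv (num - 11) 5
    let r := PySem.Int.mod (num - 11) 5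
    PySem.List.pyGetD [27, 36, 48, 64, 81] r 0 * 4 ^ k.toNat

-- ===== PRECONDITION & SPEC =====
def Spec_find_optimal3 (num : Int) (out : Int) : Prop := out = find_optimal3_alt num
instance (num : Int) (out : Int) : Decidable (Spec_find_optimal3 num out) := by unfold Spec_find_optimal3; infer_instance

-- ===== CLAIM (what is proved, stated in full; the proofs are below) =====
def Claim_equal_find_optimal3 : Prop := ∀ (num : Int), Dom_find_optimal3 num → Spec_find_optimal3 num (find_optimal3 num)

-- ===== LEMMAS AND PROOFS =====

-- the recurrence A's DP computes, as a function of the keystroke count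
def pvG : Nat → Int
  | 0 => 0 | 1 => 1 | 2 => 2 | 3 => 3 | 4 => 4 | 5 => 5 | 6 => 6
  | (n + 7) => max (2 * pvG (n + 4)) (max (3 * pvG (n + 3)) (4 * pvG (n + 2)))

-- B's closed form, over Nat
def pvCF (n : Nat) : Int :=
  if n ≤ 10 then [9, 12, 16, 20].getD (n - 7) 0
  else [27, 36, 48, 64, 81].getD ((n - 11) % 5) 0 * 4 ^ ((n - 11) / 5)

theorem pvG_add_seven (n : Nat) (h : 7 ≤ n) :
    pvG n = max (2 * pvG (n - 3)) (max (3 * pvG (n - 4)) (4 * pvG (n - 5))) := by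
  obtain ⟨k, rfl⟩ : ∃ k, n = k + 7 := ⟨n - 7, by omega⟩
  show pvG (k + 7) = _
  rw [pvG]
  rw [show k + 7 - 3 = k + 4 by omega, show k + 7 - 4 = k + 3 by omega,
      show k + 7 - 5 = k + 2 by omega]

theorem pvCF_closed (k r : Nat) (hr : r < 5) :
    pvCF (11 + 5 * k + r) = [27, 36, 48, 64, 81].getD r 0 * 4 ^ k := by
  unfold pvCF
  rw [if_neg (by omega), show 11 + 5 * k + r - 11 = 5 * k + r by omega,
      show (5 * k + r) % 5 = r by omega, show (5 * k + r) / 5 = k by omega]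

theorem pvG_eq_pvCF : ∀ n : Nat, 7 ≤ n → pvG n = pvCF n := by
  intro n
  induction n using Nat.strong_induction_on with
  | _ n IH =>
    intro h7
    by_cases h15 : n ≤ 15
    · interval_cases n <;> decide
    · obtain ⟨k, r, hr, hk, rfl⟩ : ∃ k r, r < 5 ∧ 1 ≤ k ∧ n = 11 + 5 * k + r :=
        ⟨(n - 11) / 5, (n - 11) % 5, by omega, by omega, by omega⟩
      rw [pvG_add_seven _ (by omega), pvCF_closed k r hr]
      have e3 : pvG (11 + 5 * k + r - 3) = pvCF (11 + 5 * k + r - 3) := IH _ (by omega) (by omega)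
      have e4 : pvG (11 + 5 * k + r - 4) = pvCF (11 + 5 * k + r - 4) := IH _ (by omega) (by omega)
      have e5 : pvG (11 + 5 * k + r - 5) = pvCF (11 + 5 * k + r - 5) := IH _ (by omega) (by omega)
      have hp : (0:Int) ≤ 4 ^ (k - 1) := by positivity
      have hk4 : (4:Int) ^ k = 4 ^ (k - 1) * 4 := by
        rw [← pow_succ]; congr 1; omega
      interval_cases r
      · rw [e3, e4, e5,
          show 11 + 5 * k + 0 - 3 = 11 + 5 * (k - 1) + 2 by omega, pvCF_closed _ 2 (by omega),
          show 11 + 5 * k + 0 - 4 = 11 + 5 * (k - 1) + 1 by omega, pvCF_closed _ 1 (by omega),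
          show 11 + 5 * k + 0 - 5 = 11 + 5 * (k - 1) + 0 by omega, pvCF_closed _ 0 (by omega)]
        norm_num [List.getD]
        omega
      · rw [e3, e4, e5,
          show 11 + 5 * k + 1 - 3 = 11 + 5 * (k - 1) + 3 by omega, pvCF_closed _ 3 (by omega),
          show 11 + 5 * k + 1 - 4 = 11 + 5 * (k - 1) + 2 by omega, pvCF_closed _ 2 (by omega),
          show 11 + 5 * k + 1 - 5 = 11 + 5 * (k - 1) + 1 by omega, pvCF_closed _ 1 (by omega)]
        norm_num [List.getD]
        omega
      · rw [e3, e4, e5,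
          show 11 + 5 * k + 2 - 3 = 11 + 5 * (k - 1) + 4 by omega, pvCF_closed _ 4 (by omega),
          show 11 + 5 * k + 2 - 4 = 11 + 5 * (k - 1) + 3 by omega, pvCF_closed _ 3 (by omega),
          show 11 + 5 * k + 2 - 5 = 11 + 5 * (k - 1) + 2 by omega, pvCF_closed _ 2 (by omega)]
        norm_num [List.getD]
        omega
      · rw [e3, e4, e5,
          show 11 + 5 * k + 3 - 3 = 11 + 5 * k + 0 by omega, pvCF_closed k 0 (by omega),
          show 11 + 5 * k + 3 - 4 = 11 + 5 * (k - 1) + 4 by omega, pvCF_closed _ 4 (by omega),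
          show 11 + 5 * k + 3 - 5 = 11 + 5 * (k - 1) + 3 by omega, pvCF_closed _ 3 (by omega)]
        norm_num [List.getD]
        omega
      · rw [e3, e4, e5,
          show 11 + 5 * k + 4 - 3 = 11 + 5 * k + 1 by omega, pvCF_closed k 1 (by omega),
          show 11 + 5 * k + 4 - 4 = 11 + 5 * k + 0 by omega, pvCF_closed k 0 (by omega),
          show 11 + 5 * k + 4 - 5 = 11 + 5 * (k - 1) + 4 by omega, pvCF_closed _ 4 (by omega)]
        norm_num [List.getD]
        omega

-- the state after A's first (seeding) loop
theorem pv_init (m : Nat) :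
    (PySem.List.pyRange 1 7 1).foldl (fun s i => PySem.List.pySetD s (i - 1) i)
      (List.replicate (6 + m) 0) = 1 :: 2 :: 3 :: 4 :: 5 :: 6 :: List.replicate m 0 := by
  have h : PySem.List.pyRange 1 7 1 = [1, 2, 3, 4, 5, 6] := by decide
  have h2 : List.replicate (6 + m) (0:Int) = 0 :: 0 :: 0 :: 0 :: 0 :: 0 :: List.replicate m 0 := by
    rw [List.replicate_add]; rfl
  rw [h, h2]
  norm_num [List.foldl, PySem.List.pySetD_of_nonneg, List.set]
  rfl

-- invariant for A's main loop
theorem pv_loop (num : Int) (hnum : 7 ≤ num) (m : Nat) (h6 : 6 ≤ m) (hm : (m : Int) ≤ num) :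
    ((PySem.List.pyRange 7 ((m : Int) + 1) 1).foldl pvStep
        (1 :: 2 :: 3 :: 4 :: 5 :: 6 :: List.replicate (num.toNat - 6) 0)).length = num.toNat ∧
    ∀ j : Nat, 1 ≤ j → j ≤ m →
      PySem.List.pyGetD
        ((PySem.List.pyRange 7 ((m : Int) + 1) 1).foldl pvStep
          (1 :: 2 :: 3 :: 4 :: 5 :: 6 :: List.replicate (num.toNat - 6) 0)) ((j : Int) - 1) 0 = pvG j := by
  induction m, h6 using Nat.le_induction with
  | base =>
    rw [show ((6:Nat):Int) + 1 = 7 by norm_num, PySem.List.pyRange_one_eq_nil (by omega)]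
    simp only [List.foldl]
    constructor
    · simp; omega
    · intro j h1 h2
      rw [show ((j:Nat):Int) - 1 = ((j - 1 : Nat) : Int) by omega, PySem.List.pyGetD_natCast]
      interval_cases j <;> norm_num [List.getD, pvG]
  | succ m h6 IH =>
    have IH := IH (by omega)
    set L := (PySem.List.pyRange 7 ((m : Int) + 1) 1).foldl pvStep
      (1 :: 2 :: 3 :: 4 :: 5 :: 6 :: List.replicate (num.toNat - 6) 0) with hL
    rw [show (((m + 1 : Nat)) : Int) + 1 = ((m : Int) + 1) + 1 by push_cast; ring,
        PySem.List.pyRange_one_succ_right (by omega), List.foldl_append]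
    simp only [List.foldl, ← hL]
    unfold pvStep
    have hr2 : PySem.List.pyGetD L ((m:Int) + 1 - 4) 0 = pvG (m - 2) := by
      rw [show (m:Int) + 1 - 4 = ((m - 2 : Nat) : Int) - 1 by omega]
      exact IH.2 (m - 2) (by omega) (by omega)
    have hr3 : PySem.List.pyGetD L ((m:Int) + 1 - 5) 0 = pvG (m - 3) := by
      rw [show (m:Int) + 1 - 5 = ((m - 3 : Nat) : Int) - 1 by omega]
      exact IH.2 (m - 3) (by omega) (by omega)
    have hr4 : PySem.List.pyGetD L ((m:Int) + 1 - 6) 0 = pvG (m - 4) := by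
      rw [show (m:Int) + 1 - 6 = ((m - 4 : Nat) : Int) - 1 by omega]
      exact IH.2 (m - 4) (by omega) (by omega)
    have hv : max (2 * pvG (m - 2)) (max (3 * pvG (m - 3)) (4 * pvG (m - 4))) = pvG (m + 1) := by
      rw [pvG_add_seven (m + 1) (by omega),
        show m + 1 - 3 = m - 2 by omega, show m + 1 - 4 = m - 3 by omega,
        show m + 1 - 5 = m - 4 by omega]
    have hlen : m < L.length := by rw [IH.1]; omega
    rw [hr2, hr3, hr4, hv, show (m:Int) + 1 - 1 = ((m : Nat) : Int) by omega]
    constructor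
    · rw [PySem.List.length_pySetD, IH.1]
    · intro j h1 h2
      rw [show ((j:Nat):Int) - 1 = ((j - 1 : Nat) : Int) by omega,
          PySem.List.pyGetD_pySetD_natCast _ _ _ _ _ hlen]
      by_cases hj : j = m + 1
      · subst hj
        rw [if_pos (by omega)]
      · rw [if_neg (by omega),
            show ((j - 1 : Nat) : Int) = ((j:Nat):Int) - 1 by omega]
        exact IH.2 j h1 (by omega)

theorem pvA_eq_pvG (num : Int) (hnum : 7 ≤ num) : find_optimal3 num = pvG num.toNat := by
  unfold find_optimal3
  rw [if_neg (by omega)]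
  show PySem.List.pyGetD
      ((PySem.List.pyRange 7 (num + 1) 1).foldl pvStep
        ((PySem.List.pyRange 1 7 1).foldl (fun s i => PySem.List.pySetD s (i - 1) i)
          (List.replicate num.toNat 0))) (num - 1) 0 = pvG num.toNat
  have hrep : List.replicate num.toNat (0:Int) = List.replicate (6 + (num.toNat - 6)) 0 := by
    congr 1; omega
  rw [hrep, pv_init]
  have h := pv_loop num hnum num.toNat (by omega) (by omega)
  rw [show num + 1 = ((num.toNat : Nat) : Int) + 1 by omega,
      show num - 1 = ((num.toNat : Nat) : Int) - 1 by omega]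
  exact h.2 num.toNat (by omega) (by omega)

theorem pvB_eq_pvCF (num : Int) (hnum : 7 ≤ num) : find_optimal3_alt num = pvCF num.toNat := by
  unfold find_optimal3_alt pvCF
  rw [if_neg (by omega)]
  by_cases h10 : num ≤ 10
  · rw [if_pos (by omega), if_pos (by omega)]
    interval_cases num <;> decide
  · rw [if_neg (by omega), if_neg (by omega)]
    show PySem.List.pyGetD [27, 36, 48, 64, 81] (PySem.Int.mod (num - 11) 5) 0 *
        4 ^ (PySem.Int.floordiv (num - 11) 5).toNat =
      [27, 36, 48, 64, 81].getD ((num.toNat - 11) % 5) 0 * 4 ^ ((num.toNat - 11) / 5)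
    rw [PySem.Int.floordiv_eq_ediv_of_pos (by omega), PySem.Int.mod_eq_emod_of_pos (by omega)]
    rw [show num - 11 = ((num.toNat - 11 : Nat) : Int) by omega,
        show ((num.toNat - 11 : Nat) : Int) % 5 = (((num.toNat - 11) % 5 : Nat) : Int) by push_cast; ring,
        show ((num.toNat - 11 : Nat) : Int) / 5 = (((num.toNat - 11) / 5 : Nat) : Int) by push_cast; ring,
        PySem.List.pyGetD_natCast, Int.toNat_natCast]

-- ===== VERDICT (by name: the statement is the Claim_ definition above) =====
theorem find_optimal3_spec : Claim_equal_find_optimal3 := by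
  intro num _
  unfold Spec_find_optimal3
  by_cases h : num ≤ 6
  · simp [find_optimal3, find_optimal3_alt, h]
  · have h7 : 7 ≤ num := by omega
    rw [pvA_eq_pvG num h7, pvB_eq_pvCF num h7, pvG_eq_pvCF num.toNat (by omega)]
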